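-- pv_equiv track=rewrite | github.com/Beremi/jax_petsc_nonlinear_energies | paper/scripts/validate_paper_assets.py | _strip_tex_comments
-- ===== SOURCE A (Python) =====
-- def _strip_tex_comments(text: str) -> str:
--     lines: list[str] = []
--     for line in text.splitlines():
--         escaped = False
--         kept: list[str] = []
--         for char in line:
--             if char == "%" and not escaped:
--                 break
--             kept.append(char)
--             escaped = char == "\\" and not escaped
--             if char != "\\":
--                 escaped = False
--         lines.append("".join(kept))
--     return "\n".join(lines)
-- ===== SOURCE B (Python) =====
-- def _strip_line(line: str) -> str:
--     parts = line.split("%")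
--     kept = parts[0]
--     for part in parts[1:]:
--         # the '%' before `part` is escaped iff `kept` ends in an odd run of backslashes
--         if (len(kept) - len(kept.rstrip("\\"))) % 2 == 1:
--             kept = kept + "%" + part
--         else:
--             break
--     return kept
--
--
-- def _strip_tex_comments(text: str) -> str:
--     return "\n".join(_strip_line(line) for line in text.splitlines())
-- ===== Notes on version B (the rewrite author's own statement) =====
-- stated objective: faster
-- what changed: Replaces the per-character escaped-flag state machine with splitting each line on the comment character and re-joining split pieces while the accumulated prefix ends in an odd run of backslashes (measured via rstrip), i.e. token-level C-implemented string operations instead of a character-level Python loop.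
import Mathlib
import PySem

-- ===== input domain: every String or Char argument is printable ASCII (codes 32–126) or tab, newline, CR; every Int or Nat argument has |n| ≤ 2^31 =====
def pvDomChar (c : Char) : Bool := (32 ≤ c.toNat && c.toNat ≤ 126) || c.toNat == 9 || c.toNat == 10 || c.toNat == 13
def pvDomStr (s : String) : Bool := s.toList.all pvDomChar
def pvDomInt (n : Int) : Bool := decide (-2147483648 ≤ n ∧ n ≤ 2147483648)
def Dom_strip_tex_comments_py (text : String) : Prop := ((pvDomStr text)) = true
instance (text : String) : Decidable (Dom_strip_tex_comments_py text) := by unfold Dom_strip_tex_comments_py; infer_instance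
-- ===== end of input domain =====

-- B strips TeX '%' comments by splitting each line on '%' and re-joining pieces while the
-- accumulated prefix ends in an odd backslash run, instead of A's per-character state machine.

-- ===== PORT A =====
-- the inner per-line loop of A: escaped flag, break at unescaped '%'
def pvKeepA : List Char → Bool → List Char
  | [], _ => []
  | c :: rest, escaped =>
    if c = '%' ∧ escaped = false then []
    else
      -- escaped = char == "\\" and not escaped ; if char != "\\": escaped = False
      let e1 := decide (c = '\\') && !escaped
      let e2 := if c ≠ '\\' then false else e1
      c :: pvKeepA rest e2

def strip_tex_comments_py (text : String) : String :=
  let lines : List String :=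
    (PySem.Str.splitlines text).foldl
      (fun acc line => acc ++ [String.ofList (pvKeepA line.toList false)]) []
  PySem.Str.join "\n" lines

-- ===== PORT B =====
-- hand port of kept.rstrip("\\") (exact: the strip set is the single character '\\')
def pvRstripBS (s : List Char) : List Char :=
  (s.reverse.dropWhile (fun c => c = '\\')).reverse

-- the inner loop of B over parts[1:]
def pvLoopB (kept : List Char) : List (List Char) → List Char
  | [] => kept
  | part :: rest =>
    if (kept.length - (pvRstripBS kept).length) % 2 = 1 then
      pvLoopB (kept ++ '%' :: part) rest
    else kept

-- _strip_line: parts = line.split("%"); kept = parts[0]; loop over parts[1:]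
def pvStripLineB (line : List Char) : List Char :=
  match PySem.Chars.splitOn line ['%'] with
  | [] => []          -- unreachable: split never returns an empty list
  | p :: ps => pvLoopB p ps

def strip_tex_comments_py_alt (text : String) : String :=
  PySem.Str.join "\n"
    ((PySem.Str.splitlines text).map (fun line => String.ofList (pvStripLineB line.toList)))

-- ===== PRECONDITION & SPEC =====
def Spec_strip_tex_comments_py (text : String) (out : String) : Prop := out = strip_tex_comments_py_alt text
instance (text : String) (out : String) : Decidable (Spec_strip_tex_comments_py text out) := by unfold Spec_strip_tex_comments_py; infer_instance

-- ===== CLAIM (what is proved, stated in full; the proofs are below) =====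
def Claim_equal_strip_tex_comments_py : Prop := ∀ (text : String), Dom_strip_tex_comments_py text → Spec_strip_tex_comments_py text (strip_tex_comments_py text)

-- ===== LEMMAS AND PROOFS =====

-- A's escaped-flag update as a step function
def pvEscStep (e : Bool) (c : Char) : Bool := decide (c = '\\') && !e

-- length of the trailing backslash run
def pvTrail (s : List Char) : Nat := (s.reverse.takeWhile (fun c => c = '\\')).length

-- clean structural version of line.split("%"): (first piece, remaining pieces)
def pvSplitP : List Char → List Char × List (List Char)
  | [] => ([], [])
  | c :: rest =>
    let r := pvSplitP rest
    if c = '%' then ([], r.1 :: r.2) else (c :: r.1, r.2)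

-- what the pieces after the first reconstruct to
def pvGlue (ps : List (List Char)) : List Char :=
  ps.foldr (fun q acc => '%' :: (q ++ acc)) []

theorem pvKeepA_cons (c : Char) (rest : List Char) (esc : Bool) :
    pvKeepA (c :: rest) esc =
      if c = '%' ∧ esc = false then [] else c :: pvKeepA rest (pvEscStep esc c) := by
  by_cases hc : c = '\\' <;> simp [pvKeepA, pvEscStep, hc]

theorem pvE1 (s : List Char) (h : '%' ∉ s) (rest : List Char) (esc : Bool) :
    pvKeepA (s ++ rest) esc = s ++ pvKeepA rest (s.foldl pvEscStep esc) := by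
  induction s generalizing esc with
  | nil => simp
  | cons c s' ih =>
    have hc : ¬ c = '%' := fun hh => h (hh ▸ List.mem_cons_self)
    have h' : '%' ∉ s' := fun hh => h (List.mem_cons_of_mem _ hh)
    rw [List.cons_append, pvKeepA_cons]
    simp [hc, ih h', List.foldl_cons]

theorem pvE2 (s : List Char) :
    s.foldl pvEscStep false = decide (pvTrail s % 2 = 1) := by
  induction s using List.reverseRecOn with
  | nil => simp [pvTrail]
  | append_singleton s c ih =>
    rw [List.foldl_append, List.foldl_cons, List.foldl_nil, ih]
    by_cases hc : c = '\\'
    · have h1 : pvTrail (s ++ [c]) = pvTrail s + 1 := by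
        simp [pvTrail, hc, List.reverse_append]
      rw [h1]
      by_cases ht : pvTrail s % 2 = 1 <;> simp [pvEscStep, hc, ht] <;> omega
    · have h1 : pvTrail (s ++ [c]) = 0 := by
        simp [pvTrail, List.reverse_append, hc]
      rw [h1]
      simp [pvEscStep, hc]

theorem pvTW (p : Char → Bool) (b : Char) (hb : p b = false)
    (u v : List Char) : (u ++ b :: v).takeWhile p = u.takeWhile p := by
  induction u with
  | nil => simp [hb]
  | cons c u' ih =>
    by_cases hc : p c <;> simp [hc, ih]

theorem pvTrail_append (a q : List Char) : pvTrail (a ++ '%' :: q) = pvTrail q := by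
  have h0 : a ++ '%' :: q = (a ++ ['%']) ++ q := by simp
  rw [pvTrail, h0, List.reverse_append, List.reverse_append]
  simp only [List.reverse_cons, List.reverse_nil, List.nil_append, List.singleton_append]
  rw [pvTW _ '%' (by decide) q.reverse _]
  rfl

theorem pvR (s : List Char) : s.length - (pvRstripBS s).length = pvTrail s := by
  have h := congrArg List.length
    (List.takeWhile_append_dropWhile (p := fun c => decide (c = '\\')) (l := s.reverse))
  rw [List.length_append] at h
  simp only [List.length_reverse] at h
  simp only [pvRstripBS, List.length_reverse, pvTrail]
  omega

theorem pvSplitP_glue (l : List Char) :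
    (pvSplitP l).1 ++ pvGlue (pvSplitP l).2 = l := by
  induction l with
  | nil => simp [pvSplitP, pvGlue]
  | cons c rest ih =>
    by_cases hc : c = '%' <;> simp [pvSplitP, hc, pvGlue] at ih ⊢ <;> exact ih

theorem pvSplitP_no_pct (l : List Char) :
    '%' ∉ (pvSplitP l).1 ∧ ∀ q ∈ (pvSplitP l).2, '%' ∉ q := by
  induction l with
  | nil => simp [pvSplitP]
  | cons c rest ih =>
    by_cases hc : c = '%'
    · subst hc
      simp only [pvSplitP]
      refine ⟨by simp, ?_⟩
      intro q hq
      rcases List.mem_cons.mp hq with h | h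
      · exact h ▸ ih.1
      · exact ih.2 q h
    · simp only [pvSplitP, if_neg hc]
      refine ⟨?_, ih.2⟩
      intro hm
      rcases List.mem_cons.mp hm with h | h
      · exact hc h.symm
      · exact ih.1 h

theorem pvGo_eq (fuel : Nat) : ∀ (l cur : List Char) (acc : List (List Char)),
    l.length ≤ fuel →
    PySem.Chars.splitOn.go ['%'] fuel l cur acc =
      acc.reverse ++ (cur.reverse ++ (pvSplitP l).1) :: (pvSplitP l).2 := by
  induction fuel with
  | zero =>
    intro l cur acc hl
    have hnil : l = [] := List.eq_nil_of_length_eq_zero (Nat.le_zero.mp hl)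
    subst hnil
    simp [PySem.Chars.splitOn.go, pvSplitP]
  | succ fuel ih =>
    intro l cur acc hl
    cases l with
    | nil => simp [PySem.Chars.splitOn.go, pvSplitP]
    | cons c rest =>
      rw [PySem.Chars.splitOn.go]
      by_cases hc : c = '%'
      · subst hc
        have hpre : List.isPrefixOf ['%'] ('%' :: rest) = true := by
          simp [List.isPrefixOf]
        simp only [hpre, if_true, List.length_cons, List.length_nil, List.drop_succ_cons, List.drop_zero]
        rw [ih rest [] (cur.reverse :: acc) (Nat.le_of_succ_le_succ (by simpa using hl))]
        simp [pvSplitP]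
      · have hpre : List.isPrefixOf ['%'] (c :: rest) = false := by
          simp [List.isPrefixOf]
          exact fun hh => hc hh.symm
        simp only [hpre, Bool.false_eq_true, if_false]
        rw [ih rest (c :: cur) acc (Nat.le_of_succ_le_succ (by simpa using hl))]
        simp [pvSplitP, hc]

theorem pvSplitOn_eq (l : List Char) :
    PySem.Chars.splitOn l ['%'] = (pvSplitP l).1 :: (pvSplitP l).2 := by
  rw [PySem.Chars.splitOn, pvGo_eq (l.length + 1) l [] [] (Nat.le_succ _)]
  simp

theorem pvM (parts : List (List Char)) (kept : List Char)
    (h : ∀ q ∈ parts, '%' ∉ q) :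
    pvLoopB kept parts = kept ++ pvKeepA (pvGlue parts) (decide (pvTrail kept % 2 = 1)) := by
  induction parts generalizing kept with
  | nil => simp [pvLoopB, pvGlue, pvKeepA]
  | cons q rest ih =>
    have hq : '%' ∉ q := h q List.mem_cons_self
    have hrest : ∀ p ∈ rest, '%' ∉ p := fun p hp => h p (List.mem_cons_of_mem _ hp)
    rw [pvLoopB, pvR]
    have hglue : pvGlue (q :: rest) = '%' :: (q ++ pvGlue rest) := rfl
    by_cases ht : pvTrail kept % 2 = 1
    · rw [if_pos ht, ih _ hrest, pvTrail_append]
      rw [hglue, pvKeepA_cons]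
      simp only [decide_eq_true ht]
      rw [if_neg (by simp)]
      rw [show pvEscStep true '%' = false from rfl, pvE1 q hq, pvE2]
      simp
    · rw [if_neg ht, hglue, pvKeepA_cons]
      simp [decide_eq_false ht]

theorem pvLine (l : List Char) : pvStripLineB l = pvKeepA l false := by
  rw [pvStripLineB, pvSplitOn_eq]
  change pvLoopB (pvSplitP l).1 (pvSplitP l).2 = pvKeepA l false
  rw [pvM _ _ (pvSplitP_no_pct l).2]
  conv_rhs => rw [← pvSplitP_glue l]
  rw [pvE1 _ (pvSplitP_no_pct l).1, pvE2]

-- ===== VERDICT (by name: the statement is the Claim_ definition above) =====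
theorem strip_tex_comments_py_spec : Claim_equal_strip_tex_comments_py := by
  intro text _
  unfold Spec_strip_tex_comments_py strip_tex_comments_py strip_tex_comments_py_alt
  rw [PySem.List.foldl_append_singleton_eq_map]
  simp [pvLine]
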